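-- pv_equiv track=rewrite | github.com/etherbeing/cveforge | core/compression/delta.py | succession_count
-- ===== SOURCE A (Python) =====
-- from typing import Any, Literal, Optional, cast
--
-- def succession_count(array: list[int]):
--     res: list[int] = []
--     last_el: Optional[int] = None
--     for el in array:
--         if el != last_el:
--             res.append(0)
--         else:
--             res[-1] += 1
--         last_el = el
--     return res, set(array)
-- ===== SOURCE B (Python) =====
-- def succession_count(array: list[int]):
--     n = len(array)
--     # boundary positions: index 0 plus every i+1 where adjacent elements differ
--     starts = ([0] if array else []) + [i + 1 for i, (u, v) in enumerate(zip(array, array[1:])) if v != u]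
--     # each count is the gap between consecutive boundaries, minus one
--     res = [e - s - 1 for s, e in zip(starts, starts[1:] + [n])]
--     return res, set(array)
-- ===== Notes on version B (the rewrite author's own statement) =====
-- stated objective: alternative
-- what changed: Instead of A's stateful single pass that mutates the last counter slot, B first computes the list of run-boundary indices from adjacent-pair comparisons and then obtains each count as the difference of consecutive boundary positions (minus one).
import Mathlib
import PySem

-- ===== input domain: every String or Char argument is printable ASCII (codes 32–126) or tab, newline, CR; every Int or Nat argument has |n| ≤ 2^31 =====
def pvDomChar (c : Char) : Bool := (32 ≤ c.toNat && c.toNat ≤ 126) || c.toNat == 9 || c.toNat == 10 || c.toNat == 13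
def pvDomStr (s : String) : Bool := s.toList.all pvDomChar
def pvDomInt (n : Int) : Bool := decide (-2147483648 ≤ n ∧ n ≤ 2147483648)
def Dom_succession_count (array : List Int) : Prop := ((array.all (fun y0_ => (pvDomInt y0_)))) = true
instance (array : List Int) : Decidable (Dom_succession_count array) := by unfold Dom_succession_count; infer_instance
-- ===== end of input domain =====

-- B replaces A's stateful counter-mutation pass by a boundary-index computation: run
-- boundaries from adjacent-pair comparisons, counts as differences of consecutive boundaries.

-- ===== PORT A =====
-- res[-1] += 1: increments the last element (A only reaches it with res nonempty)
def pvIncLast : List Int → List Int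
  | [] => []
  | [c] => [c + 1]
  | c :: cs => c :: pvIncLast cs

def pvStepA (st : List Int × Option Int) (el : Int) : List Int × Option Int :=
  match st.2 with
  | none => (st.1 ++ [0], some el)
  | some l => if el ≠ l then (st.1 ++ [0], some el) else (pvIncLast st.1, some el)

def succession_count (array : List Int) : List Int × List Int :=
  let st := array.foldl pvStepA ([], none)
  (st.1, PySem.Set.ofList array)

-- ===== PORT B =====
-- Python's enumerate, with an explicit starting index
def pvEnumFrom (k : Nat) : List (Int × Int) → List (Nat × (Int × Int))
  | [] => []
  | x :: xs => (k, x) :: pvEnumFrom (k + 1) xs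

def succession_count_alt (array : List Int) : List Int × List Int :=
  let n := array.length
  -- zip(array, array[1:])
  let pairs := array.zip (array.drop 1)
  -- ([0] if array else []) + [i + 1 for i, (u, v) in enumerate(pairs) if v != u]
  let starts := (if array.isEmpty then [] else [0]) ++
      ((pvEnumFrom 0 pairs).filter (fun p => p.2.2 != p.2.1)).map (fun p => p.1 + 1)
  -- [e - s - 1 for s, e in zip(starts, starts[1:] + [n])]
  let res := (starts.zip (starts.drop 1 ++ [n])).map
      (fun p => ((p.2 : Int) - (p.1 : Int) - 1))
  (res, PySem.Set.ofList array)

-- ===== PRECONDITION & SPEC =====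
def Spec_succession_count (array : List Int) (out : List Int × List Int) : Prop :=
  out = succession_count_alt array
instance (array : List Int) (out : List Int × List Int) : Decidable (Spec_succession_count array out) := by
  unfold Spec_succession_count; infer_instance

-- ===== CLAIM =====
def Claim_equal_succession_count : Prop :=
  ∀ (array : List Int), Dom_succession_count array →
    Spec_succession_count array (succession_count array)

-- ===== LEMMAS AND PROOFS =====
-- canonical run-length recursion both programs are reduced to
def pvRuns (x : Int) (c : Int) : List Int → List Int
  | [] => [c]
  | y :: ys => if y = x then pvRuns x (c + 1) ys else c :: pvRuns y 0 ys

-- boundary indices of xs after a previous element prev, first index = off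
def pvSufStarts (prev : Int) : List Int → Nat → List Nat
  | [], _ => []
  | y :: ys, off => if y = prev then pvSufStarts y ys (off + 1) else off :: pvSufStarts y ys (off + 1)

theorem pvIncLast_append (res : List Int) (c : Int) :
    pvIncLast (res ++ [c]) = res ++ [c + 1] := by
  induction res with
  | nil => rfl
  | cons a as ih =>
    cases as with
    | nil => simp [pvIncLast]
    | cons b bs => simpa [pvIncLast] using ih

-- A's fold produces exactly the run-length recursion
theorem foldl_stepA_eq_runs (xs : List Int) (x : Int) (c : Int) (res : List Int) :
    (xs.foldl pvStepA (res ++ [c], some x)).1 = res ++ pvRuns x c xs := by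
  induction xs generalizing x c res with
  | nil => simp [pvRuns]
  | cons y ys ih =>
    by_cases h : y = x
    · subst h
      simp only [List.foldl_cons, pvStepA, ne_eq, not_true_eq_false, if_false,
        pvIncLast_append, pvRuns]
      exact ih y (c + 1) res
    · simp only [List.foldl_cons, pvStepA, ne_eq, h, not_false_eq_true, if_true,
        pvRuns]
      simpa using ih y 0 (res ++ [c])

-- B's enumerate/filter/map over adjacent pairs computes the boundary indices
theorem enum_filter_eq_sufStarts (xs : List Int) (prev : Int) (k : Nat) :
    ((pvEnumFrom k ((prev :: xs).zip xs)).filter (fun p => p.2.2 != p.2.1)).map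
        (fun p => p.1 + 1) = pvSufStarts prev xs (k + 1) := by
  induction xs generalizing prev k with
  | nil => rfl
  | cons y ys ih =>
    by_cases h : y = prev
    · subst h
      simpa [pvEnumFrom, pvSufStarts] using ih y (k + 1)
    · simp only [List.zip_cons_cons, pvEnumFrom, List.filter_cons, pvSufStarts, if_neg h]
      simp [h]
      simpa [bne] using ih y (k + 1)

-- consecutive differences of the boundary list give the run-length recursion
theorem diffs_sufStarts_eq_runs (xs : List Int) (prev : Int) (s off : Nat) :
    ((s :: pvSufStarts prev xs off).zip
        ((pvSufStarts prev xs off) ++ [off + xs.length])).map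
        (fun p => ((p.2 : Int) - (p.1 : Int) - 1))
      = pvRuns prev ((off : Int) - (s : Int) - 1) xs := by
  induction xs generalizing prev s off with
  | nil => simp [pvSufStarts, pvRuns]
  | cons y ys ih =>
    by_cases h : y = prev
    · subst h
      have := ih y s (off + 1)
      simp only [pvSufStarts, pvRuns, List.length_cons, if_true]
      rw [show off + (ys.length + 1) = (off + 1) + ys.length by omega]
      rw [this]
      congr 1
      push_cast
      ring
    · have := ih y off (off + 1)
      simp only [pvSufStarts, pvRuns, if_neg h, List.length_cons,
        List.zip_cons_cons, List.cons_append, List.map_cons]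
      rw [show off + (ys.length + 1) = (off + 1) + ys.length by omega]
      rw [this]
      norm_num

-- ===== VERDICT =====
theorem succession_count_spec : Claim_equal_succession_count := by
  intro array _
  unfold Spec_succession_count succession_count succession_count_alt
  cases array with
  | nil => rfl
  | cons x xs =>
    simp only [List.foldl_cons, pvStepA]
    have hA := foldl_stepA_eq_runs xs x 0 []
    have hB1 := enum_filter_eq_sufStarts xs x 0
    have hB2 := diffs_sufStarts_eq_runs xs x 0 1
    simp only [List.drop_succ_cons, List.drop_zero, List.isEmpty_cons,
      List.length_cons] at *
    refine Prod.ext ?_ rfl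
    rw [hB1]
    norm_num at hB2
    simp only [Bool.false_eq_true, if_false, Nat.zero_add, List.singleton_append,
      List.drop_succ_cons, List.drop_zero]
    rw [show xs.length + 1 = 1 + xs.length from by omega, hB2]
    simpa using hA
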